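-- pv_equiv track=rewrite | github.com/tsukudamayo/kytea-api | kytea_sample.py | join_words
-- ===== SOURCE A (Python) =====
-- def join_words(input_list):
--     tag_list = []
--     for item in input_list:
--         item = item.split('/')
--         if len(item) == 1:
--             tag_list.append('')
--         else:
--             tag_list.append(item[1])
--     i = 0
--     output_str = ''
--     for item in input_list:
--         if tag_list[i] == '':
--             output_str += item + ' '
--         else:
--             if i == (len(input_list) - 1):
--                 output_str += item + ' '
--             else:
--                 if tag_list[i] == tag_list[i + 1]:
--                     output_str += item.split('/')[0] + '='
--                 else:
--                     output_str += item + ' '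
--         i += 1
--     output_list = output_str.split(' ')[:-1]
--
--     return output_list
-- ===== SOURCE B (Python) =====
-- def join_words(input_list):
--     def tag(s):
--         p = s.split('/')
--         return '' if len(p) == 1 else p[1]
--
--     pieces = []
--     i = 0
--     n = len(input_list)
--     while i < n:
--         t = tag(input_list[i])
--         k = 0
--         if t:
--             while i + 1 + k < n and tag(input_list[i + 1 + k]) == t:
--                 k += 1
--         for idx in range(i, i + k):
--             pieces.append(input_list[idx].split('/')[0] + '=')
--         pieces.append(input_list[i + k] + ' ')
--         i += k + 1
--     return ''.join(pieces).split(' ')[:-1]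
-- ===== Notes on version B (the rewrite author's own statement) =====
-- stated objective: alternative
-- what changed: Replaces A's two passes (building a parallel tag_list, then an index loop with i/i+1 lookahead and a last-index special case) by a single run-grouping pass that finds each maximal run of consecutive items sharing the same non-empty tag and emits the whole run at once; it trades A's precomputed tag list for recomputing tags during the run scan.
import Mathlib
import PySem

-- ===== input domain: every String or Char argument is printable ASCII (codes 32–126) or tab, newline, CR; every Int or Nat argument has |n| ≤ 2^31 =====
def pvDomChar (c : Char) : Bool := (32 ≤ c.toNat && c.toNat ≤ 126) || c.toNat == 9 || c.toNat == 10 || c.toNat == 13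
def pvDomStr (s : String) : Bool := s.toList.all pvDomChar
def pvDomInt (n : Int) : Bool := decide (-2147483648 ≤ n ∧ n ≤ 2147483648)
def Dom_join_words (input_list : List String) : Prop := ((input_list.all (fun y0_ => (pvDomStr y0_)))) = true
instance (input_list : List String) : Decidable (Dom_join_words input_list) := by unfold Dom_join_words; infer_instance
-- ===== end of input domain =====

-- B replaces A's index-lookahead over a parallel tag_list by a single run-grouping pass
-- (objective: alternative decomposition, same result).

-- ===== PORT A =====
-- A's two loops, transliterated; strings are handled on the List Char side (PySem.Chars),
-- '.split' is PySem.Chars.splitOn, the final "[:-1]" is PySem.List.slice … (some (-1)).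
def join_words (input_list : List String) : List String :=
  let tag_list : List (List Char) := input_list.foldl (fun acc item =>
      let parts := PySem.Chars.splitOn item.toList ['/']
      if parts.length = 1 then acc ++ [([] : List Char)]
      else acc ++ [parts.getD 1 []]) []
  let fin : Nat × List Char := input_list.foldl (fun st item =>
      let i := st.1
      let s := st.2
      let s' :=
        if tag_list.getD i [] = [] then s ++ item.toList ++ [' ']
        else if i = input_list.length - 1 then s ++ item.toList ++ [' ']
        else if tag_list.getD i [] = tag_list.getD (i + 1) [] then
          s ++ (PySem.Chars.splitOn item.toList ['/']).getD 0 [] ++ ['=']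
        else s ++ item.toList ++ [' ']
      (i + 1, s')) (0, [])
  (PySem.List.slice (PySem.Chars.splitOn fin.2 [' ']) none (some (-1))).map String.ofList

-- ===== PORT B =====
-- Source B's tag() helper
def pvTagB (s : String) : List Char :=
  let p := PySem.Chars.splitOn s.toList ['/']
  if p.length = 1 then [] else p.getD 1 []

-- Source B's inner while: how far the run of tag t extends into the remaining items
def pvRunExt (t : List Char) : List String → Nat
  | [] => 0
  | x :: xs => if pvTagB x = t then 1 + pvRunExt t xs else 0

-- Source B's outer while loop over the remaining list, one run per step
def pvLoopB : List String → List Char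
  | [] => []
  | x :: xs =>
    let t := pvTagB x
    let k := if t = [] then 0 else pvRunExt t xs
    let run := x :: xs.take k
    let rest := xs.drop k
    (run.dropLast.foldl
        (fun s item => s ++ (PySem.Chars.splitOn item.toList ['/']).getD 0 [] ++ ['=']) [])
      ++ (run.getLastD "").toList ++ [' '] ++ pvLoopB rest
termination_by l => l.length
decreasing_by simp

def join_words_alt (input_list : List String) : List String :=
  (PySem.List.slice (PySem.Chars.splitOn (pvLoopB input_list) [' ']) none (some (-1))).map String.ofList

-- ===== PRECONDITION & SPEC =====
def Spec_join_words (input_list : List String) (out : List String) : Prop := out = join_words_alt input_list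
instance (input_list : List String) (out : List String) : Decidable (Spec_join_words input_list out) := by unfold Spec_join_words; infer_instance

-- ===== CLAIM (what is proved, stated in full; the proofs are below) =====
def Claim_equal_join_words : Prop := ∀ (input_list : List String), Dom_join_words input_list → Spec_join_words input_list (join_words input_list)

-- ===== LEMMAS AND PROOFS =====

-- word-part of an item, as both Pythons compute it
def pvWord (s : String) : List Char := (PySem.Chars.splitOn s.toList ['/']).getD 0 []

-- common characterization of the merged string: pairwise recursion on adjacent items
def pvF : List String → List Char
  | [] => []
  | [x] => x.toList ++ [' ']
  | x :: y :: rest =>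
      (if pvTagB x ≠ [] ∧ pvTagB x = pvTagB y then pvWord x ++ ['='] else x.toList ++ [' '])
        ++ pvF (y :: rest)

lemma runExt_cons_of_eq {t : List Char} {y : String} (r : List String)
    (hy : pvTagB y = t) : pvRunExt t (y :: r) = 1 + pvRunExt t r := by
  simp [pvRunExt, hy]

lemma runExt_cons_of_ne {t : List Char} {y : String} (r : List String)
    (hy : ¬ pvTagB y = t) : pvRunExt t (y :: r) = 0 := by
  simp [pvRunExt, hy]

lemma loopB_eq_pvF (l : List String) : pvLoopB l = pvF l := by
  have key : ∀ n, ∀ l : List String, l.length ≤ n → pvLoopB l = pvF l := by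
    intro n
    induction n with
    | zero =>
      intro l hl
      have : l = [] := List.eq_nil_of_length_eq_zero (Nat.le_zero.mp hl)
      subst this; simp [pvLoopB, pvF]
    | succ n ih =>
      intro l hl
      match l with
      | [] => simp [pvLoopB, pvF]
      | x :: xs =>
        rw [pvLoopB]
        by_cases ht : pvTagB x = []
        · -- empty tag: singleton run
          simp only [ht, reduceIte, List.take_zero, List.drop_zero]
          match xs with
          | [] => simp [pvF, pvLoopB]
          | y :: r =>
            rw [ih (y :: r) (by simpa using hl)]
            simp [pvF, ht]
        · simp only [if_neg ht]
          match xs with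
          | [] => simp [pvRunExt, pvF, pvLoopB]
          | y :: r =>
            by_cases hy : pvTagB y = pvTagB x
            · -- run continues through y
              rw [runExt_cons_of_eq r hy]
              have hlen : (y :: r).length ≤ n := by simpa using hl
              rw [show (1 + pvRunExt (pvTagB x) r) = (pvRunExt (pvTagB x) r) + 1 by omega]
              simp only [List.take_succ_cons, List.drop_succ_cons]
              have hty : ¬ pvTagB y = [] := by rw [hy]; exact ht
              have hF : pvF (x :: y :: r) = pvWord x ++ ['='] ++ pvF (y :: r) := by
                simp [pvF, hy.symm, hty]
              rw [hF, ← ih (y :: r) hlen, pvLoopB]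
              simp only [hy, if_neg ht]
              simp [pvWord]
            · -- run is just [x]
              rw [runExt_cons_of_ne r hy]
              simp only [List.take_zero, List.drop_zero]
              rw [ih (y :: r) (by simpa using hl)]
              have hxy : ¬ pvTagB x = pvTagB y := fun h => hy h.symm
              simp [pvF, ht, hxy]
  exact key l.length l le_rfl

lemma tagList_eq_map (l : List String) :
    l.foldl (fun acc item =>
      let parts := PySem.Chars.splitOn item.toList ['/']
      if parts.length = 1 then acc ++ [([] : List Char)]
      else acc ++ [parts.getD 1 []]) [] = l.map pvTagB := by
  have hfun : (fun (acc : List (List Char)) item =>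
      let parts := PySem.Chars.splitOn item.toList ['/']
      if parts.length = 1 then acc ++ [([] : List Char)]
      else acc ++ [parts.getD 1 []]) = fun acc item => acc ++ [pvTagB item] := by
    funext acc item
    by_cases h : (PySem.Chars.splitOn item.toList ['/']).length = 1 <;> simp [pvTagB, h]
  rw [hfun, PySem.List.foldl_append_singleton_eq_map]
  simp

lemma loopA_eq_pvF (tl : List String) (l : List String) (i : Nat) (s : List Char)
    (htl : ∀ j, (hj : j < l.length) → (tl.map pvTagB).getD (i + j) [] = pvTagB l[j])
    (hn : i + l.length = tl.length) :
    l.foldl (fun st item =>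
      (st.1 + 1,
        if (tl.map pvTagB).getD st.1 [] = [] then st.2 ++ item.toList ++ [' ']
        else if st.1 = tl.length - 1 then st.2 ++ item.toList ++ [' ']
        else if (tl.map pvTagB).getD st.1 [] = (tl.map pvTagB).getD (st.1 + 1) [] then
          st.2 ++ (PySem.Chars.splitOn item.toList ['/']).getD 0 [] ++ ['=']
        else st.2 ++ item.toList ++ [' '])) (i, s) = (i + l.length, s ++ pvF l) := by
  induction l generalizing i s with
  | nil => simp [pvF]
  | cons x xs IH =>
    have h0 : (tl.map pvTagB).getD i [] = pvTagB x := by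
      have := htl 0 (by simp); simpa using this
    have htl' : ∀ j, (hj : j < xs.length) → (tl.map pvTagB).getD ((i + 1) + j) [] = pvTagB xs[j] := by
      intro j hj
      have := htl (j + 1) (by simp; omega)
      simpa [Nat.add_assoc, Nat.add_comm 1 j] using this
    have hn' : (i + 1) + xs.length = tl.length := by simp at hn ⊢; omega
    simp only [List.foldl_cons, h0]
    by_cases hx : pvTagB x = []
    · rw [if_pos hx]
      rw [IH (i + 1) _ htl' hn']
      simp only [Prod.mk.injEq]
      constructor
      · simp; omega
      · match xs with
        | [] => simp [pvF]
        | y :: r => simp [pvF, hx]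
    · rw [if_neg hx]
      by_cases hlast : i = tl.length - 1
      · have hxs : xs = [] := by
          have h1 : 1 ≤ tl.length := by simp at hn; omega
          have : xs.length = 0 := by simp at hn; omega
          exact List.eq_nil_of_length_eq_zero this
        subst hxs
        rw [if_pos hlast]
        simp [pvF]
      · rw [if_neg hlast]
        have hxs : xs ≠ [] := by
          intro hh; subst hh; simp at hn; omega
        obtain ⟨y, r, rfl⟩ := List.exists_cons_of_ne_nil hxs
        have h1 : (tl.map pvTagB).getD (i + 1) [] = pvTagB y := by
          have := htl 1 (by simp); simpa using this
        rw [h1]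
        by_cases he : pvTagB x = pvTagB y
        · rw [if_pos he]
          rw [IH (i + 1) _ htl' hn']
          simp only [Prod.mk.injEq]
          constructor
          · simp; omega
          · have hty : ¬ pvTagB y = [] := he ▸ hx
            simp [pvF, hty, he, pvWord]
        · rw [if_neg he]
          rw [IH (i + 1) _ htl' hn']
          simp only [Prod.mk.injEq]
          constructor
          · simp; omega
          · simp [pvF, hx, he]

-- ===== VERDICT (by name: the statement is the Claim_ definition above) =====
theorem join_words_spec : Claim_equal_join_words := by
  intro l _
  unfold Spec_join_words join_words join_words_alt
  rw [loopB_eq_pvF]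
  simp only [tagList_eq_map]
  have htl : ∀ j, (hj : j < l.length) → (l.map pvTagB).getD (0 + j) [] = pvTagB l[j] := by
    intro j hj
    rw [List.getD_eq_getElem?_getD]
    simp [hj]
  rw [loopA_eq_pvF l l 0 [] htl (by simp)]
  simp
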